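-- pv_equiv track=rewrite | github.com/ITIS-Kien/DSA-2025 | Polygon/Untitled-1.py | check
-- ===== SOURCE A (Python) =====
-- def check(n, k, a):
--     cnt = 0
--     res = 0
--     for i in range(n):
--         if a[i] == 1:  # Ký tự 'B'
--             if cnt == k:
--                 res += 1
--             cnt = 0
--         else:  # Ký tự 'A'
--             cnt += 1
--     if cnt == k:  # Kiểm tra chuỗi kết thúc bằng 'A'
--         res += 1
--     return res == 1
-- ===== SOURCE B (Python) =====
-- def check(n, k, a):
--     # Separator-index decomposition: collect positions of 1s with sentinels,
--     # then the A-run lengths are the gaps between consecutive separators.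
--     prefix = [a[i] for i in range(n)]
--     idx = [-1] + [i for i, x in enumerate(prefix) if x == 1] + [len(prefix)]
--     gaps = [b - c - 1 for c, b in zip(idx, idx[1:])]
--     return gaps.count(k) == 1
-- ===== Notes on version B (the rewrite author's own statement) =====
-- stated objective: alternative
-- what changed: A keeps a running counter and checks it at every separator in one stateful scan; B instead materialises the list of separator positions (with sentinels -1 and len), turns consecutive-position gaps into the list of run lengths, and counts how many equal k.
import Mathlib
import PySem

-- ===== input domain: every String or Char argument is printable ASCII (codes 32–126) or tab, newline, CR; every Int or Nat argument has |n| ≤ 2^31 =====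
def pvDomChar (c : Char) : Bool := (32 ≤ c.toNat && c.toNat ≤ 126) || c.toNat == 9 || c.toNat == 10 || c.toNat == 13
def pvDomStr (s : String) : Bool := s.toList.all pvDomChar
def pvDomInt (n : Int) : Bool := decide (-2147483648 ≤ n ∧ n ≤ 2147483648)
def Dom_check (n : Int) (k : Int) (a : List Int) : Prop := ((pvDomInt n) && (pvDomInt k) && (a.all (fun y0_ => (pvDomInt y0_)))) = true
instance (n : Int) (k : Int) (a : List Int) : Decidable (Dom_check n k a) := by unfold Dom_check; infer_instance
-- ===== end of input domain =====

-- B replaces A's stateful counter scan by a separator-position / gap decomposition (alternative, same cost).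

-- ===== PORT A =====
def check (n : Int) (k : Int) (a : List Int) : Bool :=
  let s := (PySem.List.pyRange 0 n 1).foldl
    (fun (st : Int × Int) i =>
      if PySem.List.pyGetD a i 0 == 1 then
        (0, if st.1 == k then st.2 + 1 else st.2)
      else (st.1 + 1, st.2)) (0, 0)
  let res := if s.1 == k then s.2 + 1 else s.2
  res == 1

-- ===== PORT B =====
def check_alt (n : Int) (k : Int) (a : List Int) : Bool :=
  let pref := (PySem.List.pyRange 0 n 1).map (fun i => PySem.List.pyGetD a i 0)
  let idx := [-1] ++ ((PySem.List.enumerate pref 0).filter (fun p => p.2 == 1)).map (fun p => p.1)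
                ++ [(pref.length : Int)]
  let gaps := (idx.zip (PySem.List.slice idx (some 1) none)).map (fun p => p.2 - p.1 - 1)
  PySem.List.count gaps k == 1

-- ===== PRECONDITION & SPEC =====
-- Pre_ excludes exactly the inputs n > len(a), on which Python's a[i] raises IndexError in both A and B.
def Pre_check (n : Int) (k : Int) (a : List Int) : Prop := n ≤ (a.length : Int)
instance (n : Int) (k : Int) (a : List Int) : Decidable (Pre_check n k a) := by unfold Pre_check; infer_instance
def pvWitness_check : Int × Int × List Int := (2, 1, [0, 1])
def Spec_check (n : Int) (k : Int) (a : List Int) (out : Bool) : Prop := out = check_alt n k a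
instance (n : Int) (k : Int) (a : List Int) (out : Bool) : Decidable (Spec_check n k a out) := by unfold Spec_check; infer_instance

-- ===== CLAIM (what is proved, stated in full; the proofs are below) =====
def Claim_equal_check : Prop := ∀ (n : Int) (k : Int) (a : List Int), Dom_check n k a → Pre_check n k a → Spec_check n k a (check n k a)

-- ===== LEMMAS AND PROOFS =====

-- A's loop body as a step function over the element values
def pvStep (k : Int) (st : Int × Int) (v : Int) : Int × Int :=
  if v == 1 then (0, if st.1 == k then st.2 + 1 else st.2) else (st.1 + 1, st.2)

-- lengths of the maximal runs of non-1 elements (head-first, always nonempty)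
def pvRuns : List Int → List Int
  | [] => [0]
  | x :: t => if x = 1 then 0 :: pvRuns t else
      match pvRuns t with
      | h :: t' => (h + 1) :: t'
      | [] => [1]

def pvBump (c : Int) : List Int → List Int
  | h :: t => (c + h) :: t
  | [] => []

-- positions (starting at offset s) of 1s in a list
def pvPos : Int → List Int → List Int
  | _, [] => []
  | s, x :: t => if x = 1 then s :: pvPos (s + 1) t else pvPos (s + 1) t

-- consecutive gaps minus one
def pvGaps : List Int → List Int
  | a :: b :: t => (b - a - 1) :: pvGaps (b :: t)
  | _ => []

lemma pvRuns_ne_nil (l : List Int) : pvRuns l ≠ [] := by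
  cases l with
  | nil => simp [pvRuns]
  | cons x t =>
    simp only [pvRuns]
    split
    · simp
    · cases h : pvRuns t <;> simp

lemma afold_char (k : Int) (l : List Int) : ∀ (c r : Int),
    (if (l.foldl (pvStep k) (c, r)).1 == k then (l.foldl (pvStep k) (c, r)).2 + 1
     else (l.foldl (pvStep k) (c, r)).2)
    = r + ((pvBump c (pvRuns l)).count k : Int) := by
  induction l with
  | nil =>
    intro c r
    simp only [List.foldl_nil, pvRuns, pvBump, List.count_cons, List.count_nil]
    by_cases h : c = k
    · simp [h]
    · simp [h, beq_iff_eq]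
  | cons x t ih =>
    intro c r
    rcases hr : pvRuns t with _ | ⟨h, t'⟩
    · exact absurd hr (pvRuns_ne_nil t)
    by_cases hx : x = 1
    · simp only [List.foldl_cons, pvStep, hx, beq_self_eq_true, if_pos, if_true]
      rw [ih]
      have hruns : pvRuns ((1 : Int) :: t) = 0 :: h :: t' := by simp [pvRuns, hr]
      rw [hruns]
      simp only [pvBump, zero_add, hr, List.count_cons]
      by_cases hck : c = k
      · simp [hck]
        ring
      · simp [hck, beq_iff_eq]
    · simp only [List.foldl_cons, pvStep]
      rw [show ((x == 1) = false) by simp [beq_iff_eq, hx]]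
      simp only [if_false, Bool.false_eq_true]
      rw [ih (c + 1) r]
      simp only [pvRuns, hx, if_false, hr, pvBump]
      ring_nf

lemma pos_eq (l : List Int) : ∀ (s : Int),
    ((PySem.List.enumerate l s).filter (fun p => p.2 == 1)).map (fun p => p.1) = pvPos s l := by
  induction l with
  | nil => intro s; simp [PySem.List.enumerate_nil, pvPos]
  | cons x t ih =>
    intro s
    rw [PySem.List.enumerate_cons]
    by_cases hx : x = 1
    · simp [hx, pvPos, ih]
    · simp [hx, pvPos, ih, beq_iff_eq]

lemma zip_tail_gaps (idx : List Int) :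
    (idx.zip idx.tail).map (fun p : Int × Int => p.2 - p.1 - 1) = pvGaps idx := by
  induction idx with
  | nil => simp [pvGaps]
  | cons a t ih =>
    cases t with
    | nil => simp [pvGaps]
    | cons b u =>
      simp only [List.tail_cons, List.zip_cons_cons, List.map_cons, pvGaps]
      rw [← ih]
      simp

lemma gaps_char (l : List Int) : ∀ (s : Int),
    pvGaps ((s - 1) :: (pvPos s l ++ [s + (l.length : Int)])) = pvRuns l := by
  induction l with
  | nil =>
    intro s
    simp [pvPos, pvGaps, pvRuns]
  | cons x t ih =>
    intro s
    have hnum : s + (((x :: t).length : Nat) : Int) = (s + 1) + (t.length : Int) := by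
      push_cast [List.length_cons]; ring
    rw [hnum]
    by_cases hx : x = 1
    · have hpos : pvPos s (x :: t) = s :: pvPos (s + 1) t := by simp [pvPos, hx]
      rw [hpos, List.cons_append]
      have h' := ih (s + 1)
      rw [show (s + 1 - 1 : Int) = s by ring] at h'
      have hstep : pvGaps ((s - 1) :: s :: (pvPos (s + 1) t ++ [(s + 1) + (t.length : Int)]))
          = (s - (s - 1) - 1) :: pvGaps (s :: (pvPos (s + 1) t ++ [(s + 1) + (t.length : Int)])) := rfl
      rw [hstep, h', show (s - (s - 1) - 1 : Int) = 0 by ring]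
      simp [pvRuns, hx]
    · have hpos : pvPos s (x :: t) = pvPos (s + 1) t := by simp [pvPos, hx]
      rw [hpos]
      rcases hr : pvRuns t with _ | ⟨h, t'⟩
      · exact absurd hr (pvRuns_ne_nil t)
      have hruns : pvRuns (x :: t) = (h + 1) :: t' := by simp [pvRuns, hx, hr]
      rw [hruns]
      rcases hR : pvPos (s + 1) t ++ [(s + 1) + (t.length : Int)] with _ | ⟨b, u⟩
      · simp at hR
      have h' := ih (s + 1)
      rw [hR, hr] at h'
      have h'' : (b - (s + 1 - 1) - 1) :: pvGaps (b :: u) = h :: t' := h'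
      have hb : b - (s + 1 - 1) - 1 = h := (List.cons_eq_cons.mp h'').1
      have hu : pvGaps (b :: u) = t' := (List.cons_eq_cons.mp h'').2
      show (b - (s - 1) - 1) :: pvGaps (b :: u) = (h + 1) :: t'
      rw [hu]
      congr 1
      omega

lemma core (n k : Int) (a : List Int) :
    check n k a = check_alt n k a := by
  unfold check check_alt
  dsimp only
  set l := (PySem.List.pyRange 0 n 1).map (fun i => PySem.List.pyGetD a i 0) with hl
  -- A side: fold over the range equals fold of pvStep over l
  have hA : (PySem.List.pyRange 0 n 1).foldl
      (fun (st : Int × Int) i =>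
        if PySem.List.pyGetD a i 0 == 1 then
          (0, if st.1 == k then st.2 + 1 else st.2)
        else (st.1 + 1, st.2)) (0, 0) = l.foldl (pvStep k) (0, 0) := by
    rw [hl, List.foldl_map]
    rfl
  rw [hA]
  have hAval := afold_char k l 0 0
  -- B side
  rw [pos_eq l 0, PySem.List.slice_from_one]
  rw [zip_tail_gaps]
  have hB : pvGaps ((-1 : Int) :: (pvPos 0 l ++ [(l.length : Int)])) = pvRuns l := by
    have := gaps_char l 0
    simpa using this
  have hidx : ([(-1 : Int)] ++ pvPos 0 l ++ [(l.length : Int)])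
      = (-1 : Int) :: (pvPos 0 l ++ [(l.length : Int)]) := by simp
  rw [hidx, hB]
  -- bump 0 is the identity on the nonempty pvRuns l
  have hbump : pvBump 0 (pvRuns l) = pvRuns l := by
    rcases hr : pvRuns l with _ | ⟨h, t'⟩
    · exact absurd hr (pvRuns_ne_nil l)
    · simp [pvBump]
  rw [hbump, zero_add] at hAval
  rw [hAval]
  rw [PySem.List.count_eq]
  -- ((cnt : Int) == 1) = (cnt == 1)
  rcases hc : (pvRuns l).count k with _ | m
  · simp
  · rcases m with _ | m'
    · simp
    · simp
      omega

-- ===== VERDICT (by name: the statement is the Claim_ definition above) =====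
theorem check_spec : Claim_equal_check := by
  intro n k a _ _
  unfold Spec_check
  exact core n k a
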